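-- pv_equiv track=rewrite | github.com/Smoren/mushroom-neural-simple | digits.py | move_signals
-- ===== SOURCE A (Python) =====
-- INPUT_LAYER_SIZE = 135
--
-- SX = 9
--
-- SY = 15
--
-- def move_signals(signals, dx, dy):
--     newsignals = []
--     for i in range(INPUT_LAYER_SIZE):
--         newsignals.append(0)
--
--     for y in range(SY):
--         for x in range(SX):
--             newy = y+dy
--             newx = x+dx
--             if newy < 0 or newy >= SY or newx < 0 or newx >= SX:
--                 continue
--
--             if newy < 0 or newy >= SY or newx < 0 or newx >= SX:
--                 continue
--
--             pos = y*SX + x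
--             newpos = newy*SX + newx
--
--             newsignals[newpos] = signals[pos]
--
--     return newsignals
-- ===== SOURCE B (Python) =====
-- INPUT_LAYER_SIZE = 135
--
-- SX = 9
--
-- SY = 15
--
-- def move_signals(signals, dx, dy):
--     # gather: compute each output cell directly from its source cell
--     return [
--         signals[(i // SX - dy) * SX + (i % SX - dx)]
--         if 0 <= i // SX - dy < SY and 0 <= i % SX - dx < SX
--         else 0
--         for i in range(INPUT_LAYER_SIZE)
--     ]
-- ===== Notes on version B (the rewrite author's own statement) =====
-- stated objective: simpler
-- what changed: B replaces A's scatter (a pre-built 135-zero buffer mutated cell-by-cell while iterating over source coordinates) with a single gather comprehension that computes each output cell directly from its source index.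
import Mathlib
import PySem

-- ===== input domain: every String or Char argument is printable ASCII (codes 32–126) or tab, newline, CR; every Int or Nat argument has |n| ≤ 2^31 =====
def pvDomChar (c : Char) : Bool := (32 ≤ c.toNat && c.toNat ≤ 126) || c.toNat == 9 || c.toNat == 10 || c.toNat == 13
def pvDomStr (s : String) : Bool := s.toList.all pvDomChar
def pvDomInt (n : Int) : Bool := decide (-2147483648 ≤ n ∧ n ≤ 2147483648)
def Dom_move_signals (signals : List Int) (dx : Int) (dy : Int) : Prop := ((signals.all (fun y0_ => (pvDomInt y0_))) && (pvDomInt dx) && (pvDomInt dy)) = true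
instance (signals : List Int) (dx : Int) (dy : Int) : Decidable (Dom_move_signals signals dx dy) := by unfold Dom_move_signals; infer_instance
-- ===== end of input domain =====

-- B replaces A's scatter (zero buffer mutated cell-by-cell over source coordinates) with a
-- single gather pass that computes each output cell directly from its source index; same cost.


-- ===== PORT A =====
def move_signals (signals : List Int) (dx : Int) (dy : Int) : List Int :=
  let newsignals : List Int :=
    (PySem.List.pyRange 0 135 1).foldl (fun acc _ => acc ++ [(0 : Int)]) []
  (PySem.List.pyRange 0 15 1).foldl (fun ns y =>
    (PySem.List.pyRange 0 9 1).foldl (fun ns x =>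
      let newy := y + dy
      let newx := x + dx
      if newy < 0 ∨ 15 ≤ newy ∨ newx < 0 ∨ 9 ≤ newx then ns
      else if newy < 0 ∨ 15 ≤ newy ∨ newx < 0 ∨ 9 ≤ newx then ns
      else
        let pos := y * 9 + x
        let newpos := newy * 9 + newx
        PySem.List.pySetD ns newpos (PySem.List.pyGetD signals pos 0)) ns) newsignals

-- ===== PORT B =====
def move_signals_alt (signals : List Int) (dx : Int) (dy : Int) : List Int :=
  (PySem.List.pyRange 0 135 1).map (fun i =>
    if 0 ≤ PySem.Int.floordiv i 9 - dy ∧ PySem.Int.floordiv i 9 - dy < 15 ∧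
       0 ≤ PySem.Int.mod i 9 - dx ∧ PySem.Int.mod i 9 - dx < 9 then
      PySem.List.pyGetD signals
        ((PySem.Int.floordiv i 9 - dy) * 9 + (PySem.Int.mod i 9 - dx)) 0
    else 0)

-- ===== PRECONDITION & SPEC =====
-- Pre_ excludes exactly the inputs on which Python A raises IndexError: those where some
-- source cell (y,x) whose shifted image lies on the grid has index y*9+x ≥ len(signals).
def Pre_move_signals (signals : List Int) (dx : Int) (dy : Int) : Prop :=
  ∀ y ∈ List.range 15, ∀ x ∈ List.range 9,
    (0 ≤ (y : Int) + dy ∧ (y : Int) + dy < 15 ∧ 0 ≤ (x : Int) + dx ∧ (x : Int) + dx < 9) →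
    y * 9 + x < signals.length
instance (signals : List Int) (dx : Int) (dy : Int) : Decidable (Pre_move_signals signals dx dy) := by unfold Pre_move_signals; infer_instance

def pvWitness_move_signals : List Int × Int × Int := ([5], 8, 14)

def Spec_move_signals (signals : List Int) (dx : Int) (dy : Int) (out : List Int) : Prop := out = move_signals_alt signals dx dy
instance (signals : List Int) (dx : Int) (dy : Int) (out : List Int) : Decidable (Spec_move_signals signals dx dy out) := by unfold Spec_move_signals; infer_instance

-- ===== CLAIM (what is proved, stated in full; the proofs are below) =====
def Claim_equal_move_signals : Prop := ∀ (signals : List Int) (dx : Int) (dy : Int), Dom_move_signals signals dx dy → Pre_move_signals signals dx dy → Spec_move_signals signals dx dy (move_signals signals dx dy)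

-- ===== LEMMAS AND PROOFS =====

-- the inner body of A's double loop, as a function of (y, x)
def pvStepA (signals : List Int) (dx dy : Int) (ns : List Int) (y x : Int) : List Int :=
  let newy := y + dy
  let newx := x + dx
  if newy < 0 ∨ 15 ≤ newy ∨ newx < 0 ∨ 9 ≤ newx then ns
  else if newy < 0 ∨ 15 ≤ newy ∨ newx < 0 ∨ 9 ≤ newx then ns
  else
    let pos := y * 9 + x
    let newpos := newy * 9 + newx
    PySem.List.pySetD ns newpos (PySem.List.pyGetD signals pos 0)

-- source cell (y,x) = q writes output index j
def pvHits (dx dy : Int) (q : Int × Int) (j : Nat) : Bool :=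
  decide (0 ≤ q.1 + dy) && decide (q.1 + dy < 15) && decide (0 ≤ q.2 + dx) &&
    decide (q.2 + dx < 9) && decide ((q.1 + dy) * 9 + (q.2 + dx) = (j : Int))

-- output index j has an on-grid source cell
def pvOk (dx dy : Int) (j : Nat) : Bool :=
  decide (0 ≤ ((j / 9 : Nat) : Int) - dy) && decide (((j / 9 : Nat) : Int) - dy < 15) &&
    decide (0 ≤ ((j % 9 : Nat) : Int) - dx) && decide (((j % 9 : Nat) : Int) - dx < 9)

-- the value written at output index j
def pvVal (signals : List Int) (dx dy : Int) (j : Nat) : Int :=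
  PySem.List.pyGetD signals ((((j / 9 : Nat) : Int) - dy) * 9 + (((j % 9 : Nat) : Int) - dx)) 0

def pvPairs : List (Int × Int) :=
  (PySem.List.pyRange 0 15 1).flatMap (fun y => (PySem.List.pyRange 0 9 1).map (fun x => (y, x)))

lemma pvFoldl2 (f : List Int → Int → Int → List Int) (ys : List Int) :
    ∀ (init xs : List Int),
      ys.foldl (fun ns y => xs.foldl (fun ns x => f ns y x) ns) init
        = (ys.flatMap (fun y => xs.map (fun x => (y, x)))).foldl (fun ns p => f ns p.1 p.2) init := by
  induction ys with
  | nil => intro init xs; simp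
  | cons y ys ih =>
      intro init xs
      simp only [List.foldl_cons, List.flatMap_cons, List.foldl_append, List.foldl_map]
      exact ih _ xs

lemma pvScatterLen (signals : List Int) (dx dy : Int) (ps : List (Int × Int)) :
    ∀ init : List Int,
      (ps.foldl (fun ns p => pvStepA signals dx dy ns p.1 p.2) init).length = init.length := by
  induction ps with
  | nil => intro init; simp
  | cons p ps ih =>
      intro init
      simp only [List.foldl_cons]
      rw [ih]
      simp only [pvStepA]
      split_ifs <;> simp [PySem.List.length_pySetD]

lemma pvScatterGet (signals : List Int) (dx dy : Int) (ps : List (Int × Int)) :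
    ∀ (init : List Int), init.length = 135 → ∀ j : Nat, j < 135 →
      (ps.foldl (fun ns p => pvStepA signals dx dy ns p.1 p.2) init)[j]?
        = if ps.any (fun q => pvHits dx dy q j) then some (pvVal signals dx dy j) else init[j]? := by
  induction ps with
  | nil => intro init hlen j hj; simp
  | cons p ps ih =>
      intro init hlen j hj
      simp only [List.foldl_cons, List.any_cons]
      by_cases hc : p.1 + dy < 0 ∨ 15 ≤ p.1 + dy ∨ p.2 + dx < 0 ∨ 9 ≤ p.2 + dx
      · have hstep : pvStepA signals dx dy init p.1 p.2 = init := by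
          unfold pvStepA; rw [if_pos hc]
        have hnp : pvHits dx dy p j = false := by
          simp only [pvHits, Bool.and_eq_false_iff, decide_eq_false_iff_not]
          omega
        rw [hstep, ih init hlen j hj]
        simp only [hnp, Bool.false_or]
      · have h1 : 0 ≤ p.1 + dy := by omega
        have h2 : p.1 + dy < 15 := by omega
        have h3 : 0 ≤ p.2 + dx := by omega
        have h4 : p.2 + dx < 9 := by omega
        have hstep : pvStepA signals dx dy init p.1 p.2
            = init.set ((p.1 + dy) * 9 + (p.2 + dx)).toNat
                (PySem.List.pyGetD signals (p.1 * 9 + p.2) 0) := by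
          unfold pvStepA
          rw [if_neg (by omega), if_neg (by omega)]
          show PySem.List.pySetD init ((p.1 + dy) * 9 + (p.2 + dx))
              (PySem.List.pyGetD signals (p.1 * 9 + p.2) 0) = _
          rw [PySem.List.pySetD_of_nonneg init _ (by omega)]
        rw [hstep, ih _ (by rw [List.length_set]; exact hlen) j hj]
        by_cases hany : ps.any (fun q => pvHits dx dy q j) = true
        · simp [hany]
        · simp only [Bool.not_eq_true] at hany
          simp only [hany, Bool.or_false]
          by_cases hhit : pvHits dx dy p j = true
          · have harith := hhit
            simp only [pvHits, Bool.and_eq_true, decide_eq_true_eq] at harith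
            obtain ⟨⟨⟨⟨hb1, hb2⟩, hb3⟩, hb4⟩, heq⟩ := harith
            have hjm : ((p.1 + dy) * 9 + (p.2 + dx)).toNat = j := by omega
            rw [if_neg (by simp), hjm, List.getElem?_set_eq_of_lt _ (by omega), if_pos hhit]
            unfold pvVal
            rw [show p.1 * 9 + p.2
                = (((j / 9 : Nat) : Int) - dy) * 9 + (((j % 9 : Nat) : Int) - dx) from by omega]
          · have harith := hhit
            simp only [pvHits, Bool.and_eq_true, decide_eq_true_eq, not_and] at harith
            have hne : ((p.1 + dy) * 9 + (p.2 + dx)).toNat ≠ j := by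
              intro h
              exact harith ⟨⟨⟨by omega, by omega⟩, by omega⟩, by omega⟩ (by omega)
            rw [if_neg (by simp), List.getElem?_set_of_lt' _ _ (by omega), if_neg hne,
              if_neg hhit]

lemma pvAnyPairs (dx dy : Int) (j : Nat) (hj : j < 135) :
    pvPairs.any (fun q => pvHits dx dy q j) = pvOk dx dy j := by
  rw [Bool.eq_iff_iff, List.any_eq_true]
  constructor
  · rintro ⟨q, hq, hhit⟩
    simp only [pvHits, Bool.and_eq_true, decide_eq_true_eq] at hhit
    obtain ⟨⟨⟨⟨hb1, hb2⟩, hb3⟩, hb4⟩, heq⟩ := hhit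
    simp only [pvOk, Bool.and_eq_true, decide_eq_true_eq]
    simp only [pvPairs, List.mem_flatMap, List.mem_map, PySem.List.mem_pyRange_one] at hq
    obtain ⟨y, ⟨hy0, hy1⟩, x, ⟨hx0, hx1⟩, rfl⟩ := hq
    simp only at hb1 hb2 hb3 hb4 heq ⊢
    omega
  · intro hok
    simp only [pvOk, Bool.and_eq_true, decide_eq_true_eq] at hok
    refine ⟨(((j / 9 : Nat) : Int) - dy, ((j % 9 : Nat) : Int) - dx), ?_, ?_⟩
    · simp only [pvPairs, List.mem_flatMap, List.mem_map, PySem.List.mem_pyRange_one]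
      exact ⟨((j / 9 : Nat) : Int) - dy, by omega, ((j % 9 : Nat) : Int) - dx, by omega, rfl⟩
    · simp only [pvHits, Bool.and_eq_true, decide_eq_true_eq]
      refine ⟨⟨⟨⟨by omega, by omega⟩, by omega⟩, by omega⟩, by omega⟩

lemma pvZeros :
    (PySem.List.pyRange 0 135 1).foldl (fun acc _ => acc ++ [(0 : Int)]) []
      = List.replicate 135 (0 : Int) := by
  rw [PySem.List.foldl_append_singleton_eq_map]
  simp [List.map_const', PySem.List.length_pyRange_one]

lemma pvA_eq_fold (signals : List Int) (dx dy : Int) :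
    move_signals signals dx dy
      = pvPairs.foldl (fun ns p => pvStepA signals dx dy ns p.1 p.2)
          (List.replicate 135 (0 : Int)) := by
  show (PySem.List.pyRange 0 15 1).foldl
      (fun ns y => (PySem.List.pyRange 0 9 1).foldl
        (fun ns x => pvStepA signals dx dy ns y x) ns)
      ((PySem.List.pyRange 0 135 1).foldl (fun acc _ => acc ++ [(0 : Int)]) [])
    = _
  rw [pvZeros, pvFoldl2]
  rfl

lemma pvA_len (signals : List Int) (dx dy : Int) :
    (move_signals signals dx dy).length = 135 := by
  rw [pvA_eq_fold, pvScatterLen, List.length_replicate]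

lemma pvA_get (signals : List Int) (dx dy : Int) (j : Nat) (hj : j < 135) :
    (move_signals signals dx dy)[j]?
      = some (if pvOk dx dy j then pvVal signals dx dy j else 0) := by
  rw [pvA_eq_fold, pvScatterGet signals dx dy pvPairs _ (List.length_replicate ..) j hj,
    pvAnyPairs dx dy j hj]
  by_cases h : pvOk dx dy j = true
  · rw [if_pos h, if_pos h]
  · rw [if_neg (by simp [h]), if_neg (by simp [h]), List.getElem?_replicate, if_pos hj]

lemma pvB_len (signals : List Int) (dx dy : Int) :
    (move_signals_alt signals dx dy).length = 135 := by
  simp [move_signals_alt, PySem.List.length_pyRange_one]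

lemma pvB_get (signals : List Int) (dx dy : Int) (j : Nat) (hj : j < 135) :
    (move_signals_alt signals dx dy)[j]?
      = some (if pvOk dx dy j then pvVal signals dx dy j else 0) := by
  unfold move_signals_alt
  rw [show (135 : Int) = ((135 : Nat) : Int) from by norm_num]
  rw [PySem.List.getElem?_map_pyRange_zero _ 135 j hj]
  have hdiv : PySem.Int.floordiv (j : Int) 9 = ((j / 9 : Nat) : Int) := by
    exact_mod_cast PySem.Int.floordiv_natCast j 9
  have hmod : PySem.Int.mod (j : Int) 9 = ((j % 9 : Nat) : Int) := by
    exact_mod_cast PySem.Int.mod_natCast j 9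
  simp only [hdiv, hmod]
  congr 1
  by_cases h : 0 ≤ ((j / 9 : Nat) : Int) - dy ∧ ((j / 9 : Nat) : Int) - dy < 15 ∧
      0 ≤ ((j % 9 : Nat) : Int) - dx ∧ ((j % 9 : Nat) : Int) - dx < 9
  · have hok : pvOk dx dy j = true := by
      simp only [pvOk, Bool.and_eq_true, decide_eq_true_eq]; omega
    rw [if_pos h, if_pos hok]
    rfl
  · have hok : pvOk dx dy j = false := by
      simp only [pvOk, Bool.and_eq_false_iff, decide_eq_false_iff_not]; omega
    rw [if_neg h, if_neg (by simp [hok])]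

-- ===== VERDICT (by name: the statement is the Claim_ definition above) =====
theorem move_signals_spec : Claim_equal_move_signals := by
  intro signals dx dy _hdom _hpre
  unfold Spec_move_signals
  apply List.ext_getElem?
  intro i
  by_cases hi : i < 135
  · rw [pvA_get signals dx dy i hi, pvB_get signals dx dy i hi]
  · rw [List.getElem?_eq_none (by rw [pvA_len]; omega),
      List.getElem?_eq_none (by rw [pvB_len]; omega)]
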